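-- pv_equiv track=rewrite | github.com/Pppp1116/Arixa | astra/layout.py | canonical_type
-- ===== SOURCE A (Python) =====
-- def canonical_type(typ: str) -> str:
--     t = typ.strip()
--     if t == "Bytes":
--         return "Vec<u8>"
--     if t.startswith("&mut "):
--         return f"&mut {canonical_type(t[5:])}"
--     if t.startswith("&"):
--         return f"&{canonical_type(t[1:])}"
--     if t.endswith("?"):
--         return f"Option<{canonical_type(t[:-1])}>"
--     if t.startswith("Option<") and t.endswith(">"):
--         return f"Option<{canonical_type(t[7:-1])}>"
--     if t.startswith("Vec<") and t.endswith(">"):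
--         return f"Vec<{canonical_type(t[4:-1])}>"
--     if t.startswith("[") and t.endswith("]"):
--         return f"[{canonical_type(t[1:-1])}]"
--     return t
-- ===== SOURCE B (Python) =====
-- # Table-driven: peel wrapper layers via a single rules table, then fold the
-- # collected output templates back around the base, innermost first.
-- _RULES = [
--     ("&mut ", "", "&mut ", ""),
--     ("&", "", "&", ""),
--     ("", "?", "Option<", ">"),
--     ("Option<", ">", "Option<", ">"),
--     ("Vec<", ">", "Vec<", ">"),
--     ("[", "]", "[", "]"),
-- ]
--
-- def canonical_type(typ: str) -> str:
--     wraps = []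
--     t = typ.strip()
--     while t != "Bytes":
--         for pre, suf, opre, osuf in _RULES:
--             if t.startswith(pre) and t.endswith(suf):
--                 wraps.append((opre, osuf))
--                 t = t[len(pre): len(t) - len(suf)].strip()
--                 break
--         else:
--             out = t
--             break
--     else:
--         out = "Vec<u8>"
--     for opre, osuf in reversed(wraps):
--         out = opre + out + osuf
--     return out
-- ===== Notes on version B (the rewrite author's own statement) =====
-- stated objective: alternative
-- what changed: Replaces A's hard-coded recursive branch chain by a data-driven loop: one rules table of (match-prefix, match-suffix, output-template) entries, a generic first-match scan over that table peeling one layer per iteration into a worklist, and a final fold wrapping the collected templates back around the base innermost-first.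
import Mathlib
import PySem

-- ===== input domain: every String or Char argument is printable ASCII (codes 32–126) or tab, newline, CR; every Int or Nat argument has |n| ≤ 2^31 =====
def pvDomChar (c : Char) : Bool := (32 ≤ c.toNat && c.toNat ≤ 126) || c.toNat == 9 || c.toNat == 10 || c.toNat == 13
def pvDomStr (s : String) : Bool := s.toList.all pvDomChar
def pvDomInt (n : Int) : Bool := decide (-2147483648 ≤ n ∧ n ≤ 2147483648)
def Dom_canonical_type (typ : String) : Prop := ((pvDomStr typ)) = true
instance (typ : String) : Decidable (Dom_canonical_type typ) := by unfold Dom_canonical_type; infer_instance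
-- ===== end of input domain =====

-- B replaces A's hard-coded recursive branch chain by a data-driven peeling
-- loop over a rules table plus a final wrapping fold; objective: alternative.

-- length facts cited by the termination arguments of both ports
theorem pvStripLenLe (s : List Char) : (PySem.Chars.strip s).length ≤ s.length := by
  simp only [PySem.Chars.strip, PySem.Chars.rstrip, PySem.Chars.lstrip, List.length_reverse]
  calc (List.dropWhile PySem.Chars.isspace (List.dropWhile PySem.Chars.isspace s).reverse).length
      ≤ (List.dropWhile PySem.Chars.isspace s).reverse.length := List.length_dropWhile_le _ _
    _ ≤ s.length := by simp [List.length_dropWhile_le]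

theorem pvSwLen {t p : List Char} (h : PySem.Chars.startswith t p = true) :
    p.length ≤ t.length :=
  ((PySem.Chars.startswith_iff t p).mp h).length_le

theorem pvEwLen {t p : List Char} (h : PySem.Chars.endswith t p = true) :
    p.length ≤ t.length :=
  ((PySem.Chars.endswith_iff t p).mp h).length_le

-- ===== PORT A =====
-- literal transliteration of the Python recursion over List Char
def canonAux (t0 : List Char) : List Char :=
  let t := PySem.Chars.strip t0
  if t = "Bytes".toList then "Vec<u8>".toList
  else if hm : PySem.Chars.startswith t "&mut ".toList then
    "&mut ".toList ++ canonAux (PySem.Chars.slice t (some 5) none)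
  else if hr : PySem.Chars.startswith t "&".toList then
    "&".toList ++ canonAux (PySem.Chars.slice t (some 1) none)
  else if hq : PySem.Chars.endswith t "?".toList then
    "Option<".toList ++ canonAux (PySem.Chars.slice t none (some (-1))) ++ ">".toList
  else if ho : PySem.Chars.startswith t "Option<".toList && PySem.Chars.endswith t ">".toList then
    "Option<".toList ++ canonAux (PySem.Chars.slice t (some 7) (some (-1))) ++ ">".toList
  else if hv : PySem.Chars.startswith t "Vec<".toList && PySem.Chars.endswith t ">".toList then
    "Vec<".toList ++ canonAux (PySem.Chars.slice t (some 4) (some (-1))) ++ ">".toList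
  else if hb : PySem.Chars.startswith t "[".toList && PySem.Chars.endswith t "]".toList then
    "[".toList ++ canonAux (PySem.Chars.slice t (some 1) (some (-1))) ++ "]".toList
  else t
termination_by t0.length
decreasing_by
  all_goals
    simp only [PySem.Chars.slice_eq_listSlice] at *
    first
      | (have h1 := pvSwLen hm)
      | (have h1 := pvSwLen hr)
      | (have h1 := pvEwLen hq)
      | (obtain ⟨ha, hb'⟩ := Bool.and_eq_true_iff.mp ho; have h1 := pvSwLen ha; have h2 := pvEwLen hb')
      | (obtain ⟨ha, hb'⟩ := Bool.and_eq_true_iff.mp hv; have h1 := pvSwLen ha; have h2 := pvEwLen hb')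
      | (obtain ⟨ha, hb'⟩ := Bool.and_eq_true_iff.mp hb; have h1 := pvSwLen ha; have h2 := pvEwLen hb')
    have h0 := pvStripLenLe t0
    simp only [show t = PySem.Chars.strip t0 from rfl] at *
    simp [PySem.List.clampIdx, PySem.List.slice] at *
    first
      | omega
      | (rcases eq_or_ne (PySem.Chars.strip t0) [] with he | he <;> simp_all <;> omega)

def canonical_type (typ : String) : String := String.ofList (canonAux typ.toList)

-- ===== PORT B =====
-- the rules table of Source B: ((match-prefix, match-suffix), (out-prefix, out-suffix))
def rulesB : List ((List Char × List Char) × (List Char × List Char)) :=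
  [ (("&mut ".toList, []), ("&mut ".toList, [])),
    (("&".toList, []), ("&".toList, [])),
    (([], "?".toList), ("Option<".toList, ">".toList)),
    (("Option<".toList, ">".toList), ("Option<".toList, ">".toList)),
    (("Vec<".toList, ">".toList), ("Vec<".toList, ">".toList)),
    (("[".toList, "]".toList), ("[".toList, "]".toList)) ]

-- the inner for-loop of Source B: first rule whose prefix and suffix both match
def findRuleB (t : List Char) :
    List ((List Char × List Char) × (List Char × List Char)) →
    Option ((List Char × List Char) × (List Char × List Char))
  | [] => none
  | r :: rs =>
    if PySem.Chars.startswith t r.1.1 && PySem.Chars.endswith t r.1.2 then some r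
    else findRuleB t rs

theorem findRuleB_spec (t : List Char) :
    ∀ rs r, findRuleB t rs = some r →
      r ∈ rs ∧ PySem.Chars.startswith t r.1.1 = true ∧ PySem.Chars.endswith t r.1.2 = true := by
  intro rs
  induction rs with
  | nil => intro r h; simp [findRuleB] at h
  | cons x xs ih =>
    intro r h
    rw [findRuleB] at h
    split_ifs at h with hc
    · cases h
      exact ⟨List.mem_cons_self, Bool.and_eq_true_iff.mp hc⟩
    · obtain ⟨hm, h1, h2⟩ := ih r h
      exact ⟨List.mem_cons_of_mem _ hm, h1, h2⟩

theorem rulesB_pos : ∀ r ∈ rulesB, 1 ≤ r.1.1.length + r.1.2.length := by decide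

-- the while-loop of Source B: t is stripped; peel one matching rule per iteration
def peelB (t : List Char) (wraps : List (List Char × List Char)) :
    List (List Char × List Char) × List Char :=
  if t = "Bytes".toList then (wraps, "Vec<u8>".toList)
  else
    match hfr : findRuleB t rulesB with
    | none => (wraps, t)
    | some r =>
        peelB
          (PySem.Chars.strip
            (PySem.Chars.slice t (some (r.1.1.length : Int))
              (some ((t.length : Int) - (r.1.2.length : Int)))))
          (wraps ++ [r.2])
termination_by t.length
decreasing_by
  obtain ⟨hm, hsw, hew⟩ := findRuleB_spec t rulesB r hfr
  have hp := pvSwLen hsw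
  have hs := pvEwLen hew
  have h1 := rulesB_pos r hm
  have hb : ((t.length : Int) - (r.1.2.length : Int)) = ((t.length - r.1.2.length : Nat) : Int) := by omega
  rw [hb, PySem.Chars.slice_eq_listSlice, PySem.List.slice_natCast]
  have h0 := pvStripLenLe ((t.drop r.1.1.length).take (t.length - r.1.2.length - r.1.1.length))
  simp at h0
  omega

def canonical_type_alt (typ : String) : String :=
  let r := peelB (PySem.Chars.strip typ.toList) []
  String.ofList (r.1.reverse.foldl (fun out w => w.1 ++ out ++ w.2) r.2)

-- ===== PRECONDITION & SPEC =====
def Spec_canonical_type (typ : String) (out : String) : Prop := out = canonical_type_alt typ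
instance (typ : String) (out : String) : Decidable (Spec_canonical_type typ out) := by unfold Spec_canonical_type; infer_instance

-- ===== CLAIM (what is proved, stated in full; the proofs are below) =====
def Claim_equal_canonical_type : Prop := ∀ (typ : String), Dom_canonical_type typ → Spec_canonical_type typ (canonical_type typ)

-- ===== LEMMAS AND PROOFS =====
theorem peelB_step (t : List Char) (wraps : List (List Char × List Char))
    (hB : ¬ t = "Bytes".toList) (p sfx op os : List Char)
    (hfr : findRuleB t rulesB = some ((p, sfx), (op, os))) :
    peelB t wraps =
      peelB (PySem.Chars.strip (PySem.Chars.slice t (some (p.length : Int))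
        (some ((t.length : Int) - (sfx.length : Int))))) (wraps ++ [(op, os)]) := by
  rw [peelB, if_neg hB]
  split
  · rename_i hn; rw [hfr] at hn; cases hn
  · rename_i r' hr'; rw [hfr] at hr'; injection hr' with h; subst h; rfl

theorem peelB_base (t : List Char) (wraps : List (List Char × List Char))
    (hB : ¬ t = "Bytes".toList) (hfr : findRuleB t rulesB = none) :
    peelB t wraps = (wraps, t) := by
  rw [peelB, if_neg hB]
  split
  · rfl
  · rename_i r' hr'; rw [hfr] at hr'; cases hr'

-- invariant: rendering peelB's result equals wrapping A's recursive result
-- with the already-accumulated templates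
theorem pvPeelRender (n : Nat) : ∀ (s : List Char), s.length ≤ n →
    ∀ (wraps : List (List Char × List Char)),
    (peelB (PySem.Chars.strip s) wraps).1.reverse.foldl
        (fun out w => w.1 ++ out ++ w.2) (peelB (PySem.Chars.strip s) wraps).2
      = wraps.reverse.foldl (fun out w => w.1 ++ out ++ w.2) (canonAux s) := by
  induction n with
  | zero =>
    intro s hlen wraps
    have h : s = [] := List.length_eq_zero_iff.mp (Nat.le_zero.mp hlen)
    subst h
    rw [peelB, canonAux]
    simp [PySem.Chars.strip, PySem.Chars.lstrip, PySem.Chars.rstrip, findRuleB, rulesB,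
      PySem.Chars.startswith, PySem.Chars.endswith]
  | succ m ih =>
    intro s hlen wraps
    have hE : ∀ (u : List Char), PySem.Chars.endswith u [] = true :=
      fun u => (PySem.Chars.endswith_iff u []).mpr List.nil_suffix
    rw [canonAux]
    split_ifs with h1 h2 h3 h4 h5 h6 h7
    · rw [peelB, if_pos h1]
    · -- rule "&mut "
      have h2' : PySem.Chars.startswith (PySem.Chars.strip s) ['&','m','u','t',' '] = true := h2
      have hfr : findRuleB (PySem.Chars.strip s) rulesB =
          some ((['&','m','u','t',' '], []), (['&','m','u','t',' '], [])) := by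
        simp [findRuleB, rulesB, hE, h2']
      rw [peelB_step _ _ h1 _ _ _ _ hfr]
      have hp := pvSwLen h2'
      have h0 := pvStripLenLe s
      have hX : PySem.Chars.slice (PySem.Chars.strip s) (some ((['&','m','u','t',' ']:List Char).length : Int))
            (some (((PySem.Chars.strip s).length : Int) - (([]:List Char).length : Int)))
          = PySem.Chars.slice (PySem.Chars.strip s) (some 5) none := by
        simp [PySem.Chars.slice_eq_listSlice, PySem.List.slice, PySem.List.clampIdx]
        simp at hp
        split_ifs <;> omega
      rw [hX, ih _ (by
        simp at hp
        simp [PySem.Chars.slice_eq_listSlice, PySem.List.slice, PySem.List.clampIdx]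
        omega)]
      simp
    · -- rule "&"
      have h2'' : PySem.Chars.startswith (PySem.Chars.strip s) ['&','m','u','t',' '] = false := by
        simpa using h2
      have h3' : PySem.Chars.startswith (PySem.Chars.strip s) ['&'] = true := h3
      have hfr : findRuleB (PySem.Chars.strip s) rulesB =
          some ((['&'], []), (['&'], [])) := by
        simp [findRuleB, rulesB, hE, h2'', h3']
      rw [peelB_step _ _ h1 _ _ _ _ hfr]
      have hp := pvSwLen h3'
      have h0 := pvStripLenLe s
      have hX : PySem.Chars.slice (PySem.Chars.strip s) (some ((['&']:List Char).length : Int))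
            (some (((PySem.Chars.strip s).length : Int) - (([]:List Char).length : Int)))
          = PySem.Chars.slice (PySem.Chars.strip s) (some 1) none := by
        simp [PySem.Chars.slice_eq_listSlice, PySem.List.slice, PySem.List.clampIdx]
        simp at hp
        split_ifs <;> omega
      rw [hX, ih _ (by
        simp at hp
        simp [PySem.Chars.slice_eq_listSlice, PySem.List.slice, PySem.List.clampIdx]
        omega)]
      simp
    · -- rule "?"
      have hS : ∀ (u : List Char), PySem.Chars.startswith u [] = true :=
        fun u => (PySem.Chars.startswith_iff u []).mpr List.nil_prefix
      have h2'' : PySem.Chars.startswith (PySem.Chars.strip s) ['&','m','u','t',' '] = false := by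
        simpa using h2
      have h3'' : PySem.Chars.startswith (PySem.Chars.strip s) ['&'] = false := by
        simpa using h3
      have h4' : PySem.Chars.endswith (PySem.Chars.strip s) ['?'] = true := h4
      have hfr : findRuleB (PySem.Chars.strip s) rulesB =
          some (([], ['?']), (['O','p','t','i','o','n','<'], ['>'])) := by
        simp [findRuleB, rulesB, hE, hS, h2'', h3'', h4']
      rw [peelB_step _ _ h1 _ _ _ _ hfr]
      have hp := pvEwLen h4'
      have h0 := pvStripLenLe s
      have hX : PySem.Chars.slice (PySem.Chars.strip s) (some (([]:List Char).length : Int))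
            (some (((PySem.Chars.strip s).length : Int) - ((['?']:List Char).length : Int)))
          = PySem.Chars.slice (PySem.Chars.strip s) none (some (-1)) := by
        simp at hp
        simp [PySem.Chars.slice_eq_listSlice, PySem.List.slice, PySem.List.clampIdx]
        rcases eq_or_ne (PySem.Chars.strip s) [] with he | he <;>
          simp [he] at hp ⊢ <;> first | rfl | omega | (congr 1 <;> omega)
      rw [hX, ih _ (by
        simp at hp
        simp [PySem.Chars.slice_eq_listSlice, PySem.List.slice, PySem.List.clampIdx]
        rcases eq_or_ne (PySem.Chars.strip s) [] with he | he <;>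
          simp [he] at hp ⊢ <;> omega)]
      simp
    · -- rule "Option<...>"
      obtain ⟨ho1, ho2⟩ := Bool.and_eq_true_iff.mp h5
      have h2'' : PySem.Chars.startswith (PySem.Chars.strip s) ['&','m','u','t',' '] = false := by
        simpa using h2
      have h3'' : PySem.Chars.startswith (PySem.Chars.strip s) ['&'] = false := by
        simpa using h3
      have h4'' : PySem.Chars.endswith (PySem.Chars.strip s) ['?'] = false := by
        simpa using h4
      have ho1' : PySem.Chars.startswith (PySem.Chars.strip s) ['O','p','t','i','o','n','<'] = true := ho1
      have ho2' : PySem.Chars.endswith (PySem.Chars.strip s) ['>'] = true := ho2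
      have hfr : findRuleB (PySem.Chars.strip s) rulesB =
          some ((['O','p','t','i','o','n','<'], ['>']), (['O','p','t','i','o','n','<'], ['>'])) := by
        simp [findRuleB, rulesB, hE, h2'', h3'', h4'', ho1', ho2']
      rw [peelB_step _ _ h1 _ _ _ _ hfr]
      have hp := pvSwLen ho1'
      have hq := pvEwLen ho2'
      have h0 := pvStripLenLe s
      have hX : PySem.Chars.slice (PySem.Chars.strip s) (some ((['O','p','t','i','o','n','<']:List Char).length : Int))
            (some (((PySem.Chars.strip s).length : Int) - ((['>']:List Char).length : Int)))
          = PySem.Chars.slice (PySem.Chars.strip s) (some 7) (some (-1)) := by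
        simp at hp hq
        simp [PySem.Chars.slice_eq_listSlice, PySem.List.slice, PySem.List.clampIdx]
        rcases eq_or_ne (PySem.Chars.strip s) [] with he | he <;>
          simp [he] at hp hq ⊢ <;> first | rfl | omega | (congr 1 <;> omega)
      rw [hX, ih _ (by
        simp at hp hq
        simp [PySem.Chars.slice_eq_listSlice, PySem.List.slice, PySem.List.clampIdx]
        rcases eq_or_ne (PySem.Chars.strip s) [] with he | he <;>
          simp [he] at hp ⊢ <;> omega)]
      simp
    · -- rule "Vec<...>"
      obtain ⟨hv1, hv2⟩ := Bool.and_eq_true_iff.mp h6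
      have h2'' : PySem.Chars.startswith (PySem.Chars.strip s) ['&','m','u','t',' '] = false := by
        simpa using h2
      have h3'' : PySem.Chars.startswith (PySem.Chars.strip s) ['&'] = false := by
        simpa using h3
      have h4'' : PySem.Chars.endswith (PySem.Chars.strip s) ['?'] = false := by
        simpa using h4
      have h5'' : ¬ (PySem.Chars.startswith (PySem.Chars.strip s) ['O','p','t','i','o','n','<'] = true ∧
          PySem.Chars.endswith (PySem.Chars.strip s) ['>'] = true) := by
        intro hc
        exact h5 (Bool.and_eq_true_iff.mpr hc)
      have hv1' : PySem.Chars.startswith (PySem.Chars.strip s) ['V','e','c','<'] = true := hv1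
      have hv2' : PySem.Chars.endswith (PySem.Chars.strip s) ['>'] = true := hv2
      have h5o : PySem.Chars.startswith (PySem.Chars.strip s) ['O','p','t','i','o','n','<'] = false := by
        rcases Bool.eq_false_or_eq_true (PySem.Chars.startswith (PySem.Chars.strip s) ['O','p','t','i','o','n','<']) with h | h
        · exact absurd ⟨h, hv2'⟩ h5''
        · exact h
      have hfr : findRuleB (PySem.Chars.strip s) rulesB =
          some ((['V','e','c','<'], ['>']), (['V','e','c','<'], ['>'])) := by
        simp [findRuleB, rulesB, hE, h2'', h3'', h4'', h5o, hv1', hv2']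
      rw [peelB_step _ _ h1 _ _ _ _ hfr]
      have hp := pvSwLen hv1'
      have hq := pvEwLen hv2'
      have h0 := pvStripLenLe s
      have hX : PySem.Chars.slice (PySem.Chars.strip s) (some ((['V','e','c','<']:List Char).length : Int))
            (some (((PySem.Chars.strip s).length : Int) - ((['>']:List Char).length : Int)))
          = PySem.Chars.slice (PySem.Chars.strip s) (some 4) (some (-1)) := by
        simp at hp hq
        simp [PySem.Chars.slice_eq_listSlice, PySem.List.slice, PySem.List.clampIdx]
        rcases eq_or_ne (PySem.Chars.strip s) [] with he | he <;>
          simp [he] at hp hq ⊢ <;> first | rfl | omega | (congr 1 <;> omega)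
      rw [hX, ih _ (by
        simp at hp hq
        simp [PySem.Chars.slice_eq_listSlice, PySem.List.slice, PySem.List.clampIdx]
        rcases eq_or_ne (PySem.Chars.strip s) [] with he | he <;>
          simp [he] at hp ⊢ <;> omega)]
      simp
    · -- rule "[...]"
      obtain ⟨hb1, hb2⟩ := Bool.and_eq_true_iff.mp h7
      have h2'' : PySem.Chars.startswith (PySem.Chars.strip s) ['&','m','u','t',' '] = false := by
        simpa using h2
      have h3'' : PySem.Chars.startswith (PySem.Chars.strip s) ['&'] = false := by
        simpa using h3
      have h4'' : PySem.Chars.endswith (PySem.Chars.strip s) ['?'] = false := by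
        simpa using h4
      have hb1' : PySem.Chars.startswith (PySem.Chars.strip s) ['['] = true := hb1
      have hb2' : PySem.Chars.endswith (PySem.Chars.strip s) [']'] = true := hb2
      have h5o : ¬ (PySem.Chars.startswith (PySem.Chars.strip s) ['O','p','t','i','o','n','<'] = true ∧
          PySem.Chars.endswith (PySem.Chars.strip s) ['>'] = true) := by
        intro hc
        exact h5 (Bool.and_eq_true_iff.mpr hc)
      have h6o : ¬ (PySem.Chars.startswith (PySem.Chars.strip s) ['V','e','c','<'] = true ∧
          PySem.Chars.endswith (PySem.Chars.strip s) ['>'] = true) := by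
        intro hc
        exact h6 (Bool.and_eq_true_iff.mpr hc)
      have hfr : findRuleB (PySem.Chars.strip s) rulesB =
          some ((['['], [']']), (['['], [']'])) := by
        simp [findRuleB, rulesB, hE, h2'', h3'', h4'', hb1', hb2']
        rw [if_neg h5o, if_neg h6o]
      rw [peelB_step _ _ h1 _ _ _ _ hfr]
      have hp := pvSwLen hb1'
      have hq := pvEwLen hb2'
      have h0 := pvStripLenLe s
      have hX : PySem.Chars.slice (PySem.Chars.strip s) (some ((['[']:List Char).length : Int))
            (some (((PySem.Chars.strip s).length : Int) - (([']']:List Char).length : Int)))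
          = PySem.Chars.slice (PySem.Chars.strip s) (some 1) (some (-1)) := by
        simp at hp hq
        simp [PySem.Chars.slice_eq_listSlice, PySem.List.slice, PySem.List.clampIdx]
        rcases eq_or_ne (PySem.Chars.strip s) [] with he | he <;>
          simp [he] at hp hq ⊢ <;> first | rfl | omega | (congr 1 <;> omega)
      rw [hX, ih _ (by
        simp at hp hq
        simp [PySem.Chars.slice_eq_listSlice, PySem.List.slice, PySem.List.clampIdx]
        rcases eq_or_ne (PySem.Chars.strip s) [] with he | he <;>
          simp [he] at hp ⊢ <;> omega)]
      simp
    · -- no rule matches: base case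
      have hS : ∀ (u : List Char), PySem.Chars.startswith u [] = true :=
        fun u => (PySem.Chars.startswith_iff u []).mpr List.nil_prefix
      have h2'' : PySem.Chars.startswith (PySem.Chars.strip s) ['&','m','u','t',' '] = false := by
        simpa using h2
      have h3'' : PySem.Chars.startswith (PySem.Chars.strip s) ['&'] = false := by
        simpa using h3
      have h4'' : PySem.Chars.endswith (PySem.Chars.strip s) ['?'] = false := by
        simpa using h4
      have h5o : ¬ (PySem.Chars.startswith (PySem.Chars.strip s) ['O','p','t','i','o','n','<'] = true ∧
          PySem.Chars.endswith (PySem.Chars.strip s) ['>'] = true) := by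
        intro hc
        exact h5 (Bool.and_eq_true_iff.mpr hc)
      have h6o : ¬ (PySem.Chars.startswith (PySem.Chars.strip s) ['V','e','c','<'] = true ∧
          PySem.Chars.endswith (PySem.Chars.strip s) ['>'] = true) := by
        intro hc
        exact h6 (Bool.and_eq_true_iff.mpr hc)
      have h7o : ¬ (PySem.Chars.startswith (PySem.Chars.strip s) ['['] = true ∧
          PySem.Chars.endswith (PySem.Chars.strip s) [']'] = true) := by
        intro hc
        exact h7 (Bool.and_eq_true_iff.mpr hc)
      have hfr : findRuleB (PySem.Chars.strip s) rulesB = none := by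
        simp [findRuleB, rulesB, hE, hS, h2'', h3'', h4'']
        rw [if_neg h5o, if_neg h6o, if_neg h7o]
      rw [peelB_base _ _ h1 hfr]

-- ===== VERDICT (by name: the statement is the Claim_ definition above) =====
theorem canonical_type_spec : Claim_equal_canonical_type := by
  intro typ _
  show canonical_type typ = canonical_type_alt typ
  simp only [canonical_type, canonical_type_alt]
  rw [pvPeelRender typ.toList.length typ.toList le_rfl []]
  simp
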